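-- pv_equiv track=rewrite | github.com/Ronan-H/codewars | python/battleship_field_validator_2.py | gen_place_map
-- ===== SOURCE A (Python) =====
-- def gen_place_map(board, side_len, holes):
--     """
--     Generates a mapping of the biggest pieces that can fit into each hole remaining in the board.
--     """
--     place_map = dict()
--     size = len(board)
--     for i in holes:
--         j = i
--         max_width = -1
--         height = 1
--         hole_place_map = []
--         row_end = i + (side_len - (i % side_len))
--
--         # loop with ascending rectangle height
--         while j < size:
--             width = 0
--             # find the maximum width rectangle that can fit here
--             while j < row_end and board[j] and (max_width == -1 or width < max_width):
--                 j += 1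
--                 width += 1
--             if width == 0:
--                 break
--             hole_place_map.append(width)
--             max_width = width if max_width == -1 else min(width, max_width)
--             j = i + (height * side_len)
--             height += 1
--             row_end += side_len
--
--         place_map[i] = [len(hole_place_map)] + hole_place_map
--
--     return place_map
-- ===== SOURCE B (Python) =====
-- def gen_place_map(board, side_len, holes):
--     """
--     Generates a mapping of the biggest pieces that can fit into each hole remaining in the board.
--     """
--     size = len(board)
--     # run[c] = number of consecutive truthy cells starting at c (ignoring rows)
--     run = [0] * size
--     for c in range(size - 1, -1, -1):
--         run[c] = run[c + 1] + 1 if board[c] and c + 1 < size else int(board[c])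
--     place_map = {}
--     for i in holes:
--         widths = []
--         m = size  # widest piece that could possibly fit
--         cell = i
--         while cell < size:
--             room = side_len - cell % side_len  # space left in this row
--             if room <= 0:
--                 break
--             w = min(m, run[cell], room)
--             if w <= 0:
--                 break
--             widths.append(w)
--             m = w
--             cell += side_len
--         place_map[i] = [len(widths)] + widths
--     return place_map
-- ===== Notes on version B (the rewrite author's own statement) =====
-- stated objective: alternative
-- what changed: B precomputes in one right-to-left pass a run-length table run[c] (consecutive truthy cells from c) and answers each hole by a single columnar descent, each row's width being the min of the previous width, the table lookup and the room left in the row, instead of A's per-hole nested rightward rescanning of the board cell by cell; same overall cost on the measured inputs.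
import Mathlib
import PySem

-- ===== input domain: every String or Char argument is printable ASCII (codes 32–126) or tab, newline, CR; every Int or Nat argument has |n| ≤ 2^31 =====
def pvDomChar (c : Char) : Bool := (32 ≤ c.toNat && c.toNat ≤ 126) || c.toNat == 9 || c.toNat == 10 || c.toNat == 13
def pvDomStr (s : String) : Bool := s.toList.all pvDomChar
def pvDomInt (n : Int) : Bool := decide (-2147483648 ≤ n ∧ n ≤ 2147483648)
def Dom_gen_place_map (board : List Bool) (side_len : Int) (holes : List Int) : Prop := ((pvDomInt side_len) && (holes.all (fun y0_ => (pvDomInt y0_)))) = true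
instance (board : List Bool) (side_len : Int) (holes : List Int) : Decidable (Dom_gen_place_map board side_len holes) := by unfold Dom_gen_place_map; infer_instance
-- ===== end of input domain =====

-- B replaces A's per-hole nested rightward rescans by a precomputed run-length table
-- plus one columnar min-descent per hole (objective: alternative algorithm, same cost).


-- ===== PORT A =====
-- inner 'while j < row_end and board[j] and (max_width == -1 or width < max_width)' loop;
-- fueled (the fuel passed below always suffices); board[j] via pyGet? (none, i.e. Python's
-- IndexError, reads as a falsy cell here; Pre_ excludes exactly the inputs where Python reaches it).
def pvInnerA (board : List Bool) (row_end max_width : Int) : Int → Int → Nat → Int × Int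
  | j, width, 0 => (j, width)
  | j, width, fuel + 1 =>
    if j < row_end ∧ (PySem.List.pyGet? board j).getD false = true ∧
        (max_width = -1 ∨ width < max_width) then
      pvInnerA board row_end max_width (j + 1) (width + 1) fuel
    else (j, width)

-- outer 'while j < size' loop of A, accumulating hole_place_map
def pvOuterA (board : List Bool) (side_len i : Int) :
    Int → Int → Int → Int → List Int → Nat → List Int
  | _, _, _, _, acc, 0 => acc
  | j, row_end, max_width, height, acc, fuel + 1 =>
    if j < (board.length : Int) then
      let p := pvInnerA board row_end max_width j 0 (board.length + 1)
      if p.2 = 0 then acc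
      else
        pvOuterA board side_len i (i + height * side_len) (row_end + side_len)
          (if max_width = -1 then p.2 else min p.2 max_width) (height + 1)
          (acc ++ [p.2]) fuel
    else acc

def pvHoleA (board : List Bool) (side_len i : Int) : List Int :=
  let l := pvOuterA board side_len i i (i + (side_len - PySem.Int.mod i side_len)) (-1) 1 []
    (2 * board.length + 1)
  ((l.length : Int)) :: l

def gen_place_map (board : List Bool) (side_len : Int) (holes : List Int) : List (Int × List Int) :=
  (holes.foldl (fun d i => d.insert i (pvHoleA board side_len i)) PySem.Dict.empty).items

-- ===== PORT B =====
-- run-length table, built from the right: run[c] = run[c+1] + 1 if board[c] else 0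
def pvRun : List Bool → List Int
  | [] => []
  | b :: rest =>
    let tail := pvRun rest
    (if b then 1 + tail.headD 0 else 0) :: tail

-- columnar descent: 'while cell < size'; break when no room is left in the row, else the
-- width is the min of the previous width, the run-table lookup and that room
def pvDescB (run : List Int) (size side_len : Int) : Int → Int → Nat → List Int
  | _, _, 0 => []
  | cell, m, fuel + 1 =>
    if cell < size then
      let room := side_len - PySem.Int.mod cell side_len
      if room ≤ 0 then []
      else
        let w := min (min m ((PySem.List.pyGet? run cell).getD 0)) room
        if w ≤ 0 then [] else w :: pvDescB run size side_len (cell + side_len) w fuel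
    else []

def pvHoleB (run : List Int) (size side_len i : Int) (fuel : Nat) : List Int :=
  let l := pvDescB run size side_len i size fuel
  ((l.length : Int)) :: l

def gen_place_map_alt (board : List Bool) (side_len : Int) (holes : List Int) : List (Int × List Int) :=
  let run := pvRun board
  (holes.foldl (fun d i =>
      d.insert i (pvHoleB run (board.length : Int) side_len i (2 * board.length + 1)))
    PySem.Dict.empty).items

-- ===== PRECONDITION & SPEC =====
-- board[x] with Python's negative-index wraparound, a falsy default out of range
def pvWB (board : List Bool) (x : Int) : Bool := (PySem.List.pyGet? board x).getD false

-- exactly the holes on which A's inner scan evaluates board[len(board)] (IndexError):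
-- the hole's column meets the partial last row at cell t, the cells from t to the board
-- end are all truthy, and every column cell above t starts a truthy run of ≥ d cells
-- (d = cells from t to the end), so no earlier row narrows the width below d
def pvCrashHole (board : List Bool) (s i : Int) : Bool :=
  decide (i < (board.length : Int)) &&
  decide (0 < PySem.Int.mod (board.length : Int) s - PySem.Int.mod i s) &&
  (PySem.List.pyRange ((board.length : Int) - PySem.Int.mod (board.length : Int) s + PySem.Int.mod i s) (board.length : Int) 1).all (fun x => pvWB board x) &&
  (PySem.List.pyRange i ((board.length : Int) - PySem.Int.mod (board.length : Int) s + PySem.Int.mod i s) s).all (fun c =>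
    (PySem.List.pyRange c (c + (PySem.Int.mod (board.length : Int) s - PySem.Int.mod i s)) 1).all (fun x => pvWB board x))

-- Pre_ excludes exactly the inputs on which the Python A raises: side_len = 0 with at
-- least one hole (ZeroDivisionError), and, for positive side_len, a hole below
-- -len(board) (IndexError on board[i]) or a hole satisfying pvCrashHole (IndexError when
-- the scan runs past the board end); on every other input A returns and is matched.
def Pre_gen_place_map (board : List Bool) (side_len : Int) (holes : List Int) : Prop :=
  (holes ≠ [] → side_len ≠ 0) ∧
  (0 < side_len → ∀ i ∈ holes, -(board.length : Int) ≤ i ∧ pvCrashHole board side_len i = false)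
instance (board : List Bool) (side_len : Int) (holes : List Int) : Decidable (Pre_gen_place_map board side_len holes) := by unfold Pre_gen_place_map; infer_instance

def pvWitness_gen_place_map : List Bool × Int × List Int :=
  ([true, true, false, true], 2, [0, 1, 3, -1])

def Spec_gen_place_map (board : List Bool) (side_len : Int) (holes : List Int) (out : List (Int × List Int)) : Prop := out = gen_place_map_alt board side_len holes
instance (board : List Bool) (side_len : Int) (holes : List Int) (out : List (Int × List Int)) : Decidable (Spec_gen_place_map board side_len holes out) := by unfold Spec_gen_place_map; infer_instance

-- ===== CLAIM (what is proved, stated in full; the proofs are below) =====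
def Claim_equal_gen_place_map : Prop := ∀ (board : List Bool) (side_len : Int) (holes : List Int), Dom_gen_place_map board side_len holes → Pre_gen_place_map board side_len holes → Spec_gen_place_map board side_len holes (gen_place_map board side_len holes)

-- ===== LEMMAS AND PROOFS =====
-- (the equality of the two ports is in fact proved from 'side_len ≠ 0' and the hole bound
-- alone: the ports are total, reading an out-of-range cell as falsy exactly where Python
-- raises, so Pre_'s pvCrashHole conjunct only serves to keep Python's IndexError inputs out)

theorem pvRun_length : ∀ (bs : List Bool), (pvRun bs).length = bs.length := by
  intro bs
  induction bs with
  | nil => rfl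
  | cons b rest ih => simp [pvRun, ih]

theorem pvRun_nonneg : ∀ (bs : List Bool) (x : Int), x ∈ pvRun bs → 0 ≤ x := by
  intro bs
  induction bs with
  | nil => intro x hx; simp [pvRun] at hx
  | cons b rest ih =>
    intro x hx
    simp only [pvRun, List.mem_cons] at hx
    rcases hx with h | h
    · subst h
      split_ifs with hb
      · rcases hrt : pvRun rest with _ | ⟨y, ys⟩
        · simp
        · have hy : 0 ≤ y := ih y (by rw [hrt]; exact List.mem_cons_self)
          simp only [List.headD_cons]
          omega
      · omega
    · exact ih x h

theorem pvRun_get : ∀ (bs : List Bool) (k : Nat) (hk : k < bs.length),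
    (pvRun bs)[k]? = some (if bs[k] then 1 + ((pvRun bs)[k + 1]?.getD 0) else 0) := by
  intro bs
  induction bs with
  | nil => intro k hk; simp at hk
  | cons b rest ih =>
    intro k hk
    cases k with
    | zero =>
      simp only [pvRun, List.getElem?_cons_zero, List.getElem?_cons_succ, List.getElem_cons_zero]
      have hh : (pvRun rest).headD 0 = ((pvRun rest)[0]?).getD 0 := by
        cases pvRun rest <;> simp
      simp only [hh]
    | succ k =>
      simp only [List.length_cons] at hk
      have hk' : k < rest.length := by omega
      simp only [pvRun, List.getElem?_cons_succ, List.getElem_cons_succ, ih k hk']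

def pvRv (board : List Bool) (j : Int) : Int :=
  (PySem.List.pyGet? (pvRun board) j).getD 0

theorem pvRv_nonneg (board : List Bool) (j : Int) : 0 ≤ pvRv board j := by
  unfold pvRv
  cases h : PySem.List.pyGet? (pvRun board) j with
  | none => simp
  | some x => simpa using pvRun_nonneg board x (PySem.List.mem_of_pyGet?_eq_some _ h)

theorem pvRun_le : ∀ (bs : List Bool) (x : Int), x ∈ pvRun bs → x ≤ (bs.length : Int) := by
  intro bs
  induction bs with
  | nil => intro x hx; simp [pvRun] at hx
  | cons b rest ih =>
    intro x hx
    simp only [pvRun, List.mem_cons] at hx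
    rcases hx with h | h
    · subst h
      split_ifs with hb
      · rcases hrt : pvRun rest with _ | ⟨y, ys⟩
        · simp
        · have hy : y ≤ (rest.length : Int) := ih y (by rw [hrt]; exact List.mem_cons_self)
          simp only [List.headD_cons, List.length_cons]
          push_cast
          omega
      · simp only [List.length_cons]; push_cast; omega
    · have := ih x h
      simp only [List.length_cons]
      push_cast
      omega

theorem pvRv_le_length (board : List Bool) (j : Int) :
    pvRv board j ≤ (board.length : Int) := by
  unfold pvRv
  cases h : PySem.List.pyGet? (pvRun board) j with
  | none => simp
  | some x =>
    have := pvRun_le board x (PySem.List.mem_of_pyGet?_eq_some _ h)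
    simpa using this

theorem pvWB_oob (board : List Bool) (j : Int) (h : (board.length : Int) ≤ j) :
    pvWB board j = false := by
  unfold pvWB
  have hn : PySem.List.pyGet? board j = none := by
    rw [PySem.List.pyGet?_eq_none_iff]
    unfold PySem.Raise.InRange
    omega
  rw [hn]
  rfl

theorem pvRv_oob (board : List Bool) (j : Int) (h : (board.length : Int) ≤ j) :
    pvRv board j = 0 := by
  unfold pvRv
  have hn : PySem.List.pyGet? (pvRun board) j = none := by
    rw [PySem.List.pyGet?_eq_none_iff]
    unfold PySem.Raise.InRange
    rw [pvRun_length]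
    omega
  rw [hn]
  rfl

theorem pvRv_recur (board : List Bool) (j : Int) (hj : 0 ≤ j)
    (hjs : j < (board.length : Int)) :
    pvRv board j = if pvWB board j then 1 + pvRv board (j + 1) else 0 := by
  have hk : j.toNat < board.length := by omega
  have h1 : pvRv board j = ((pvRun board)[j.toNat]?).getD 0 := by
    unfold pvRv; rw [PySem.List.pyGet?_of_nonneg _ hj]
  have h2 : pvRv board (j + 1) = ((pvRun board)[j.toNat + 1]?).getD 0 := by
    unfold pvRv
    rw [PySem.List.pyGet?_of_nonneg _ (by omega : (0:Int) ≤ j + 1)]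
    have ht : (j + 1).toNat = j.toNat + 1 := by omega
    rw [ht]
  have h3 : pvWB board j = board[j.toNat] := by
    unfold pvWB
    rw [PySem.List.pyGet?_of_nonneg _ hj, List.getElem?_eq_getElem hk]
    rfl
  rw [h1, h2, h3, pvRun_get board j.toNat hk]
  split_ifs <;> simp_all

-- Python's negative-index wraparound, as a shift by the length
theorem pvGet_wrap {α : Type} (xs : List α) (j : Int) (h1 : -(xs.length : Int) ≤ j)
    (h2 : j < 0) :
    PySem.List.pyGet? xs j = PySem.List.pyGet? xs (j + (xs.length : Int)) := by
  have hk0 : 0 < (-j).toNat := by omega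
  have hkl : (-j).toNat ≤ xs.length := by omega
  have hj : j = -((-j).toNat : Int) := by omega
  rw [hj, PySem.List.pyGet?_neg_natCast xs (-j).toNat hk0 hkl,
    PySem.List.pyGet?_of_nonneg _ (by omega : (0:Int) ≤ -((-j).toNat : Int) + xs.length)]
  have ht : ((-((-j).toNat : Int)) + (xs.length : Int)).toNat = xs.length - (-j).toNat := by omega
  rw [ht]

theorem pvRv_wrap (board : List Bool) (j : Int) (h1 : -(board.length : Int) ≤ j)
    (h2 : j < 0) : pvRv board j = pvRv board (j + (board.length : Int)) := by
  unfold pvRv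
  have hl : ((pvRun board).length : Int) = (board.length : Int) := by
    rw [pvRun_length]
  rw [pvGet_wrap (pvRun board) j (by omega) h2, hl]

theorem pvWB_wrap (board : List Bool) (j : Int) (h1 : -(board.length : Int) ≤ j)
    (h2 : j < 0) : pvWB board j = pvWB board (j + (board.length : Int)) := by
  unfold pvWB
  rw [pvGet_wrap board j h1 h2]

-- the run-table recursion, valid on both the non-negative and the wrapped negative side
theorem pvRv_recurW (board : List Bool) (j : Int)
    (h : (0 ≤ j ∧ j < (board.length : Int)) ∨ (-(board.length : Int) ≤ j ∧ j + 1 < 0)) :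
    pvRv board j = if pvWB board j then 1 + pvRv board (j + 1) else 0 := by
  rcases h with ⟨h0, h1⟩ | ⟨h0, h1⟩
  · exact pvRv_recur board j h0 h1
  · rw [pvRv_wrap board j h0 (by omega), pvWB_wrap board j h0 (by omega),
      pvRv_wrap board (j + 1) (by omega) h1]
    have := pvRv_recur board (j + (board.length : Int)) (by omega) (by omega)
    rw [this]
    have he : j + (board.length : Int) + 1 = j + 1 + (board.length : Int) := by ring
    rw [he]

-- pvRv j is zero exactly on falsy cells (both sides of the wrap)
theorem pvRv_zero_iff (board : List Bool) (j : Int) (h1 : -(board.length : Int) ≤ j)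
    (h2 : j < (board.length : Int)) :
    (pvWB board j = true → 1 ≤ pvRv board j) ∧ (pvWB board j = false → pvRv board j = 0) := by
  by_cases hj : 0 ≤ j
  · have := pvRv_recur board j hj h2
    have hn := pvRv_nonneg board (j + 1)
    constructor
    · intro hb; rw [this, if_pos hb]; omega
    · intro hb; rw [this, if_neg (by simp [hb])]
  · have hwv := pvRv_wrap board j h1 (by omega)
    have hwb := pvWB_wrap board j h1 (by omega)
    have := pvRv_recur board (j + (board.length : Int)) (by omega) (by omega)
    have hn := pvRv_nonneg board (j + (board.length : Int) + 1)
    constructor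
    · intro hb; rw [hwv, this, if_pos (by rw [← hwb]; exact hb)]; omega
    · intro hb; rw [hwv, this, if_neg (by rw [← hwb]; simp [hb])]

theorem pvDvdSmall (side x : Int) (h0 : 0 ≤ x) (h1 : x < side)
    (hd : side ∣ x) : x = 0 := by
  have h := Int.emod_eq_zero_of_dvd hd
  rwa [Int.emod_eq_of_lt h0 h1] at h

theorem pvRowEnd_dvd (side j : Int) (hs : 0 < side) :
    side ∣ (j + (side - PySem.Int.mod j side)) := by
  rw [PySem.Int.mod_eq_emod_of_pos hs]
  have h : side * (j / side) + j % side = j := Int.mul_ediv_add_emod j side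
  exact ⟨j / side + 1, by linarith⟩

theorem pvRowEnd_neg (side j : Int) (hs : 0 < side) (hj : j < 0) :
    j + (side - PySem.Int.mod j side) ≤ 0 := by
  rw [PySem.Int.mod_eq_emod_of_pos hs]
  have h : side * (j / side) + j % side = j := Int.mul_ediv_add_emod j side
  have hq : j / side < 0 := Int.ediv_neg_of_neg_of_pos hj hs
  have : side * (j / side + 1) ≤ 0 := mul_nonpos_of_nonneg_of_nonpos hs.le (by omega)
  linarith

theorem pvInnerA_succ (board : List Bool) (re mw j w : Int) (fuel : Nat) :
    pvInnerA board re mw j w (fuel + 1) =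
      if j < re ∧ (PySem.List.pyGet? board j).getD false = true ∧ (mw = -1 ∨ w < mw) then
        pvInnerA board re mw (j + 1) (w + 1) fuel
      else (j, w) := rfl

theorem pvInnerA_stop (board : List Bool) (re mw j w : Int) (fuel : Nat) (h : ¬ j < re) :
    pvInnerA board re mw j w fuel = (j, w) := by
  cases fuel with
  | zero => rfl
  | succ f => rw [pvInnerA_succ, if_neg (by tauto)]

theorem pvInner_spec (board : List Bool) (side re mw : Int)
    (hre0 : PySem.Int.mod re side = 0) :
    ∀ (fuel : Nat) (j w : Int),
      -(board.length : Int) ≤ j → (0 ≤ j ∨ re ≤ 0) →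
      j < re → re - j ≤ side →
      (min re (board.length : Int) - j).toNat ≤ fuel →
      (mw = -1 → (pvInnerA board re mw j w fuel).2 = w + min (pvRv board j) (re - j)) ∧
      (0 ≤ w → w ≤ mw → (pvInnerA board re mw j w fuel).2 =
        w + min (mw - w) (min (pvRv board j) (re - j))) := by
  intro fuel
  induction fuel with
  | zero =>
    intro j w hjlo hr h1 h2 h3
    have hsz : (board.length : Int) ≤ j := by omega
    have hR0 : pvRv board j = 0 := pvRv_oob board j hsz
    have e : (pvInnerA board re mw j w 0).2 = w := rfl
    refine ⟨fun hmw => ?_, fun hw0 hwm => ?_⟩ <;> rw [e, hR0] <;> omega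
  | succ fuel ih =>
    intro j w hjlo hr h1 h2 h3
    by_cases hjsz : j < (board.length : Int)
    case neg =>
      -- the scan is past the board end: the cell reads falsy and rv is 0
      have hb' : (PySem.List.pyGet? board j).getD false = false :=
        pvWB_oob board j (by omega)
      have hR0 : pvRv board j = 0 := pvRv_oob board j (by omega)
      have hstop : pvInnerA board re mw j w (fuel + 1) = (j, w) := by
        rw [pvInnerA_succ,
          if_neg (by rintro ⟨-, hc, -⟩; rw [hb'] at hc; exact Bool.false_ne_true hc)]
      refine ⟨fun hmw => ?_, fun hw0 hwm => ?_⟩ <;> rw [hstop] <;>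
        show w = _ <;> rw [hR0] <;> omega
    case pos =>
      have hz := pvRv_zero_iff board j hjlo hjsz
      have hRnn := pvRv_nonneg board j
      by_cases hb : pvWB board j = true
      · have hb' : (PySem.List.pyGet? board j).getD false = true := hb
        have hR1 : 1 ≤ pvRv board j := hz.1 hb
        by_cases hm1 : PySem.Int.mod (j + 1) side = 0
        · -- j + 1 is exactly the row end: one step, then the scan stops
          have hje : j + 1 = re := by
            have hd1 : side ∣ re := (PySem.Int.mod_eq_zero_iff_dvd re side).mp hre0
            have hd2 : side ∣ (j + 1) := (PySem.Int.mod_eq_zero_iff_dvd (j + 1) side).mp hm1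
            have := pvDvdSmall side (re - (j + 1)) (by omega) (by omega) (dvd_sub hd1 hd2)
            omega
          constructor
          · intro hmw
            rw [pvInnerA_succ, if_pos ⟨h1, hb', Or.inl hmw⟩,
              pvInnerA_stop _ _ _ _ _ _ (by omega)]
            have hp : ((j + 1, w + 1) : Int × Int).2 = w + 1 := rfl
            rw [hp]
            omega
          · intro hw0 hwm
            by_cases hlt : w < mw
            · rw [pvInnerA_succ, if_pos ⟨h1, hb', Or.inr hlt⟩,
                pvInnerA_stop _ _ _ _ _ _ (by omega)]
              have hp : ((j + 1, w + 1) : Int × Int).2 = w + 1 := rfl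
              rw [hp]
              omega
            · rw [pvInnerA_succ, if_neg (by rintro ⟨-, -, h⟩; omega)]
              have hp : ((j, w) : Int × Int).2 = w := rfl
              rw [hp]
              omega
        · -- j + 1 is still inside the row
          have hjlt : j + 1 < re := by
            rcases lt_or_eq_of_le (show j + 1 ≤ re by omega) with h | h
            · exact h
            · exact absurd (h ▸ hre0) hm1
          have hrW : pvRv board j = 1 + pvRv board (j + 1) := by
            rw [pvRv_recurW board j ?_, if_pos hb]
            by_cases hj0 : 0 ≤ j
            · exact Or.inl ⟨hj0, hjsz⟩
            · exact Or.inr ⟨hjlo, by omega⟩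
          have hr' : 0 ≤ j + 1 ∨ re ≤ 0 := by
            rcases hr with h0 | h0
            · exact Or.inl (by omega)
            · exact Or.inr h0
          have ihn := ih (j + 1) (w + 1) (by omega) hr' hjlt (by omega) (by omega)
          have hRnn' := pvRv_nonneg board (j + 1)
          constructor
          · intro hmw
            rw [pvInnerA_succ, if_pos ⟨h1, hb', Or.inl hmw⟩, ihn.1 hmw]
            omega
          · intro hw0 hwm
            by_cases hlt : w < mw
            · rw [pvInnerA_succ, if_pos ⟨h1, hb', Or.inr hlt⟩, ihn.2 (by omega) (by omega)]
              omega
            · rw [pvInnerA_succ, if_neg (by rintro ⟨-, -, h⟩; omega)]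
              have hp : ((j, w) : Int × Int).2 = w := rfl
              rw [hp]
              omega
      · -- board[j] is falsy: the scan stops and pvRv j = 0
        have hb0 : pvWB board j = false := by simpa using hb
        have hb' : (PySem.List.pyGet? board j).getD false = false := hb0
        have hR0 : pvRv board j = 0 := hz.2 hb0
        have hstop : pvInnerA board re mw j w (fuel + 1) = (j, w) := by
          rw [pvInnerA_succ,
            if_neg (by rintro ⟨-, hc, -⟩; rw [hb'] at hc; exact Bool.false_ne_true hc)]
        refine ⟨fun hmw => ?_, fun hw0 hwm => ?_⟩ <;> rw [hstop] <;>
          show w = _ <;> rw [hR0] <;> omega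

theorem pvOuterA_succ (board : List Bool) (side i j re mw height : Int) (acc : List Int)
    (fuel : Nat) :
    pvOuterA board side i j re mw height acc (fuel + 1) =
      if j < (board.length : Int) then
        (let p := pvInnerA board re mw j 0 (board.length + 1)
         if p.2 = 0 then acc
         else pvOuterA board side i (i + height * side) (re + side)
           (if mw = -1 then p.2 else min p.2 mw) (height + 1) (acc ++ [p.2]) fuel)
      else acc := rfl

theorem pvDescB_succ (run : List Int) (size side cell m : Int) (fuel : Nat) :
    pvDescB run size side cell m (fuel + 1) =
      if cell < size then
        (let room := side - PySem.Int.mod cell side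
         if room ≤ 0 then []
         else
           let w := min (min m ((PySem.List.pyGet? run cell).getD 0)) room
           if w ≤ 0 then [] else w :: pvDescB run size side (cell + side) w fuel)
      else [] := rfl

theorem pvMod_period (side j : Int) (hs : 0 < side) :
    PySem.Int.mod (j + side) side = PySem.Int.mod j side := by
  rw [PySem.Int.mod_eq_emod_of_pos hs, PySem.Int.mod_eq_emod_of_pos hs]
  have : j + side = j + side * 1 := by ring
  rw [this, Int.add_mul_emod_self_left]

theorem pvOuter_step (board : List Bool) (side i : Int) (hs : 0 < side)
    (fuel : Nat) (j re mw m height : Int) (acc : List Int)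
    (hjlo : -(board.length : Int) ≤ j) (hre : re = j + (side - PySem.Int.mod j side))
    (hP : (mw = -1 ∧ m = (board.length : Int)) ∨ (mw = m ∧ 1 ≤ m))
    (hjh : j = i + (height - 1) * side)
    (hjs : j < (board.length : Int)) (h1 : j < re) (h2 : re - j ≤ side)
    (hre0 : PySem.Int.mod re side = 0)
    (hr : 0 ≤ j ∨ re ≤ 0)
    (ih : ∀ (j re mw m height : Int) (acc : List Int),
      -(board.length : Int) ≤ j → re = j + (side - PySem.Int.mod j side) →
      ((mw = -1 ∧ m = (board.length : Int)) ∨ (mw = m ∧ 1 ≤ m)) →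
      j = i + (height - 1) * side →
      pvOuterA board side i j re mw height acc fuel =
        acc ++ pvDescB (pvRun board) (board.length : Int) side j m fuel) :
    pvOuterA board side i j re mw height acc (fuel + 1) =
      acc ++ pvDescB (pvRun board) (board.length : Int) side j m (fuel + 1) := by
  have hfuel : (min re (board.length : Int) - j).toNat ≤ board.length + 1 := by omega
  have hin := pvInner_spec board side re mw hre0 (board.length + 1) j 0 hjlo hr h1 h2 hfuel
  have hRnn := pvRv_nonneg board j
  set ρ : Int := min (pvRv board j) (re - j) with hρ
  have hρnn : 0 ≤ ρ := by omega
  set W : Int := if mw = -1 then ρ else min mw ρ with hW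
  have hPW : (pvInnerA board re mw j 0 (board.length + 1)).2 = W := by
    rcases hP with ⟨hmw, -⟩ | ⟨hmw, hm1⟩
    · rw [hW, if_pos hmw, hin.1 hmw]; omega
    · rw [hW, if_neg (by omega), hin.2 le_rfl (by omega)]; omega
  have hgr : (PySem.List.pyGet? (pvRun board) j).getD 0 = pvRv board j := rfl
  have hsp : side - PySem.Int.mod j side = re - j := by omega
  have hroom : ¬ (side - PySem.Int.mod j side ≤ 0) := by omega
  have hBW : min (min m ((PySem.List.pyGet? (pvRun board) j).getD 0))
      (side - PySem.Int.mod j side) = W := by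
    rw [hgr, hsp]
    rcases hP with ⟨hmw, hm⟩ | ⟨hmw, hm1⟩
    · rw [hW, if_pos hmw, hm]
      have hRle := pvRv_le_length board j
      omega
    · rw [hW, if_neg (by omega), hmw]; omega
  rw [pvOuterA_succ, if_pos hjs, pvDescB_succ, if_pos hjs]
  show (if (pvInnerA board re mw j 0 (board.length + 1)).2 = 0 then acc
        else pvOuterA board side i (i + height * side) (re + side)
          (if mw = -1 then (pvInnerA board re mw j 0 (board.length + 1)).2
           else min (pvInnerA board re mw j 0 (board.length + 1)).2 mw) (height + 1)
          (acc ++ [(pvInnerA board re mw j 0 (board.length + 1)).2]) fuel) =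
      acc ++ (if side - PySem.Int.mod j side ≤ 0 then []
              else
                if min (min m ((PySem.List.pyGet? (pvRun board) j).getD 0))
                    (side - PySem.Int.mod j side) ≤ 0 then []
                else min (min m ((PySem.List.pyGet? (pvRun board) j).getD 0))
                    (side - PySem.Int.mod j side) ::
                  pvDescB (pvRun board) (board.length : Int) side (j + side)
                    (min (min m ((PySem.List.pyGet? (pvRun board) j).getD 0))
                      (side - PySem.Int.mod j side)) fuel)
  rw [hPW, if_neg hroom, hBW]
  have hWnn : 0 ≤ W := by
    rcases hP with ⟨hmw, -⟩ | ⟨hmw, hm1⟩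
    · rw [hW, if_pos hmw]; omega
    · rw [hW, if_neg (by omega)]; omega
  by_cases hW0 : W = 0
  · rw [if_pos hW0, if_pos (by omega)]
    simp
  · have hW1 : 1 ≤ W := by omega
    have hWle : ¬ W ≤ 0 := by omega
    rw [if_neg hW0, if_neg hWle]
    have hmw' : (if mw = -1 then W else min W mw) = W := by
      rcases hP with ⟨hmw, -⟩ | ⟨hmw, hm1⟩
      · rw [if_pos hmw]
      · rw [if_neg (by omega), hW, if_neg (by omega), hmw]
        omega
    have hj' : i + height * side = j + side := by rw [hjh]; ring
    rw [hmw', hj']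
    rw [ih (j + side) (re + side) W W (height + 1) (acc ++ [W]) (by omega)
      (by rw [pvMod_period side j hs]; omega) (Or.inr ⟨rfl, hW1⟩) (by rw [hjh]; ring)]
    simp

theorem pvOuter_eq (board : List Bool) (side i : Int) (hs : 0 < side) :
    ∀ (fuel : Nat) (j re mw m height : Int) (acc : List Int),
      -(board.length : Int) ≤ j → re = j + (side - PySem.Int.mod j side) →
      ((mw = -1 ∧ m = (board.length : Int)) ∨ (mw = m ∧ 1 ≤ m)) →
      j = i + (height - 1) * side →
      pvOuterA board side i j re mw height acc fuel =
        acc ++ pvDescB (pvRun board) (board.length : Int) side j m fuel := by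
  intro fuel
  induction fuel with
  | zero => intro j re mw m height acc _ _ _ _; simp [pvOuterA, pvDescB]
  | succ fuel ih =>
    intro j re mw m height acc hjlo hre hP hjh
    by_cases hjs : j < (board.length : Int)
    · have hmn : (0 : Int) ≤ PySem.Int.mod j side := PySem.Int.mod_nonneg j hs
      have hml : PySem.Int.mod j side < side := PySem.Int.mod_lt j hs
      have h1 : j < re := by omega
      have h2 : re - j ≤ side := by omega
      have hre0 : PySem.Int.mod re side = 0 := by
        rw [hre]
        exact (PySem.Int.mod_eq_zero_iff_dvd _ side).mpr (pvRowEnd_dvd side j hs)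
      by_cases hj0 : 0 ≤ j
      · exact pvOuter_step board side i hs fuel j re mw m height acc hjlo hre hP hjh hjs
          h1 h2 hre0 (Or.inl hj0) ih
      · have hre_neg : re ≤ 0 := hre ▸ pvRowEnd_neg side j hs (by omega)
        exact pvOuter_step board side i hs fuel j re mw m height acc hjlo hre hP hjh hjs
          h1 h2 hre0 (Or.inr hre_neg) ih
    · rw [pvOuterA_succ, if_neg hjs, pvDescB_succ, if_neg hjs]
      simp

theorem pvHole_eq (board : List Bool) (side_len i : Int)
    (hs : 0 < side_len) (hi : -(board.length : Int) ≤ i) :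
    pvHoleA board side_len i =
      pvHoleB (pvRun board) (board.length : Int) side_len i (2 * board.length + 1) := by
  unfold pvHoleA pvHoleB
  rw [pvOuter_eq board side_len i hs (2 * board.length + 1) i
    (i + (side_len - PySem.Int.mod i side_len)) (-1) (board.length : Int) 1 [] hi rfl
    (Or.inl ⟨rfl, rfl⟩) (by ring)]
  simp

-- with a negative side_len, the room in the row is negative for every cell on both
-- sides, so both programs emit [0] for every hole
theorem pvHole_eq_neg (board : List Bool) (side_len i : Int) (hneg : side_len < 0) :
    pvHoleA board side_len i =
      pvHoleB (pvRun board) (board.length : Int) side_len i (2 * board.length + 1) := by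
  obtain ⟨hb1, hb2⟩ := PySem.Int.mod_neg_bounds i hneg
  unfold pvHoleA pvHoleB
  rw [pvOuterA_succ, pvDescB_succ]
  by_cases hjs : i < (board.length : Int)
  · rw [if_pos hjs, if_pos hjs]
    have hsp : side_len - PySem.Int.mod i side_len < 0 := by omega
    have hstop := pvInnerA_stop board (i + (side_len - PySem.Int.mod i side_len)) (-1) i 0
      (board.length + 1) (by omega)
    simp only [hstop]
    rw [if_pos (by omega : side_len - PySem.Int.mod i side_len ≤ 0)]
    simp
  · rw [if_neg hjs, if_neg hjs]

-- ===== VERDICT (by name: the statement is the Claim_ definition above) =====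
theorem gen_place_map_spec : Claim_equal_gen_place_map := by
  intro board side_len holes _ hpre
  unfold Spec_gen_place_map gen_place_map gen_place_map_alt
  congr 1
  apply PySem.List.foldl_congr_mem
  intro acc i hm
  have hs0 : side_len ≠ 0 := hpre.1 (by rintro rfl; cases hm)
  rcases lt_trichotomy side_len 0 with hneg | hz | hpos
  · rw [pvHole_eq_neg board side_len i hneg]
  · exact absurd hz hs0
  · rw [pvHole_eq board side_len i hpos ((hpre.2 hpos i hm).1)]
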